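-- pv_equiv track=rewrite | github.com/boostcampaitech7/level4-cv-finalproject-hackathon-cv-14-lv3 | database/format_converter/db_to_supabase.py | transform_weekly_sales
-- ===== SOURCE A (Python) =====
-- from typing import Any
--
-- def transform_weekly_sales(rows: list[tuple]) -> list[dict[str, Any]]:
--     transformed = []
--     for row in rows:
--         sales_data = {"id": row[0]}
--         for i, value in enumerate(row[1:], 1):
--             if i <= 52:
--                 week = f"2022_w{i:02d}"
--             else:
--                 week = f"2023_w{i - 52:02d}"
--             sales_data[week] = value if value is not None else 0
--         transformed.append(sales_data)
--     return transformed
-- ===== SOURCE B (Python) =====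
-- def transform_weekly_sales(rows: list) -> list:
--     # Column-major: one dict per row with its id, then fill week columns one at a
--     # time (each label computed once), instead of A's row-major per-cell formatting.
--     dicts = [{"id": r[0]} for r in rows]
--     width = max((len(r) for r in rows), default=1)
--     for i in range(1, width):
--         w = i if i <= 52 else i - 52
--         label = ("2022_w" if i <= 52 else "2023_w") + "%02d" % w
--         for d, r in zip(dicts, rows):
--             if i < len(r):
--                 v = r[i]
--                 d[label] = v if v is not None else 0
--     return dicts
-- ===== Notes on version B (the rewrite author's own statement) =====
-- stated objective: alternative
-- what changed: B is column-major: it first builds one id-dict per row, computes the shared width, then for each week column computes the label once and writes that column's value into every row long enough, instead of A's row-major loop that formats a fresh label for every cell of every row.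
import Mathlib
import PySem

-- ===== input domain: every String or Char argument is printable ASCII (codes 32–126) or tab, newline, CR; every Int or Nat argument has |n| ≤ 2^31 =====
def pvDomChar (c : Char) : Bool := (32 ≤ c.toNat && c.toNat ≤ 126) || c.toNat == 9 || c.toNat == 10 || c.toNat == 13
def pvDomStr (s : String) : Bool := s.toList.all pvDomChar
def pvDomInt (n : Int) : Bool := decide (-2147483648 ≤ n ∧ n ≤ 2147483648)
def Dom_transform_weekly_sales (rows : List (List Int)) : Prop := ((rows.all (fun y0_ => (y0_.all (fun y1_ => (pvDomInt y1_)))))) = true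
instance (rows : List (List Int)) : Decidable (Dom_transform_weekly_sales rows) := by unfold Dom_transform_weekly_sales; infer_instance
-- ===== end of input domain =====

-- B is column-major: one id-dict per row, then each week column is filled across all rows
-- with its label computed once; same values in the same dict order, a different traversal.

-- ===== PORT A =====
-- Inner `value if value is not None else 0` is the identity here: the declared cell type is Int,
-- so None does not occur in the ported input domain.
-- `row[0]` raises IndexError on an empty row; Pre_ excludes empty rows, so pyGetD's default is never used.
def transform_weekly_sales (rows : List (List Int)) : List (List (String × Int)) :=
  rows.foldl
    (fun transformed row =>
      let sales0 : PySem.Dict String Int :=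
        PySem.Dict.empty.insert "id" (PySem.List.pyGetD row 0 0)
      let sales :=
        (PySem.List.enumerate (PySem.List.slice row (some 1)) 1).foldl
          (fun d p =>
            let week :=
              if p.1 ≤ 52 then
                String.ofList ('2' :: '0' :: '2' :: '2' :: '_' :: 'w' ::
                  PySem.Chars.zfill (PySem.Int.toChars p.1) 2)
              else
                String.ofList ('2' :: '0' :: '2' :: '3' :: '_' :: 'w' ::
                  PySem.Chars.zfill (PySem.Int.toChars (p.1 - 52)) 2)
            d.insert week p.2)
          sales0
      transformed ++ [sales.items])
    []

-- ===== PORT B =====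
-- Mirrors Source B's per-column label: w first, then prefix + "%02d" % w
-- (for w ≥ 1, "%02d" % w is exactly zfill of str(w) to width 2; string concatenation
-- is ported on the char-list side as PySem prescribes).
def pvWeekLabel (i : Int) : String :=
  let w : Int := if i ≤ 52 then i else i - 52
  let pre : List Char := if i ≤ 52 then ['2','0','2','2','_','w'] else ['2','0','2','3','_','w']
  String.ofList (pre ++ PySem.Chars.zfill (PySem.Int.toChars w) 2)

def transform_weekly_sales_alt (rows : List (List Int)) : List (List (String × Int)) :=
  let dicts0 : List (PySem.Dict String Int) :=
    rows.map (fun r => PySem.Dict.empty.insert "id" (PySem.List.pyGetD r 0 0))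
  let width : Int := PySem.List.maxD (rows.map PySem.List.len) (fun x => x) 1
  let dicts :=
    (PySem.List.pyRange 1 width).foldl
      (fun ds i =>
        let label := pvWeekLabel i
        (ds.zip rows).map (fun p =>
          if i < PySem.List.len p.2 then p.1.insert label (PySem.List.pyGetD p.2 i 0) else p.1))
      dicts0
  dicts.map PySem.Dict.items

-- ===== PRECONDITION & SPEC =====
-- Pre_ excludes rows containing an empty tuple: there Python A raises IndexError on row[0].
def Pre_transform_weekly_sales (rows : List (List Int)) : Prop := ∀ r ∈ rows, r ≠ []
instance (rows : List (List Int)) : Decidable (Pre_transform_weekly_sales rows) := by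
  unfold Pre_transform_weekly_sales; infer_instance

def pvWitness_transform_weekly_sales : List (List Int) := [[7, 1, 0], [8, 5]]

def Spec_transform_weekly_sales (rows : List (List Int)) (out : List (List (String × Int))) : Prop :=
  out = transform_weekly_sales_alt rows
instance (rows : List (List Int)) (out : List (List (String × Int))) : Decidable (Spec_transform_weekly_sales rows out) := by
  unfold Spec_transform_weekly_sales; infer_instance

-- ===== CLAIM (what is proved, stated in full; the proofs are below) =====
def Claim_equal_transform_weekly_sales : Prop :=
  ∀ (rows : List (List Int)), Dom_transform_weekly_sales rows →
    Pre_transform_weekly_sales rows →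
    Spec_transform_weekly_sales rows (transform_weekly_sales rows)

-- ===== LEMMAS AND PROOFS =====

-- Nat.toDigitsCore: writing to an accumulator is appending.
theorem pv_tdc_append (f : Nat) : ∀ (n : Nat) (acc : List Char),
    Nat.toDigitsCore 10 f n acc = Nat.toDigitsCore 10 f n [] ++ acc := by
  induction f with
  | zero => intro n acc; simp [Nat.toDigitsCore]
  | succ f ih =>
    intro n acc
    simp only [Nat.toDigitsCore]
    by_cases h : n / 10 = 0
    · simp [h]
    · simp only [h, if_false]
      rw [ih (n / 10) (Nat.digitChar (n % 10) :: acc), ih (n / 10) [Nat.digitChar (n % 10)]]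
      simp

-- One unit of surplus fuel is irrelevant once the fuel covers the digit count.
theorem pv_tdc_fuel_succ (f : Nat) : ∀ (n : Nat) (acc : List Char), n < 10 ^ (f + 1) →
    Nat.toDigitsCore 10 (f + 2) n acc = Nat.toDigitsCore 10 (f + 1) n acc := by
  induction f with
  | zero =>
    intro n acc h
    have h10 : n / 10 = 0 := Nat.div_eq_of_lt (by simpa using h)
    simp [Nat.toDigitsCore, h10]
  | succ f ih =>
    intro n acc h
    by_cases h10 : n / 10 = 0
    · simp [Nat.toDigitsCore, h10]
    · have hlt : n / 10 < 10 ^ (f + 1) := by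
        exact Nat.div_lt_of_lt_mul (by rw [pow_succ'] at h; exact h)
      calc Nat.toDigitsCore 10 (f + 3) n acc
          = Nat.toDigitsCore 10 (f + 2) (n / 10) (Nat.digitChar (n % 10) :: acc) := by
            simp [Nat.toDigitsCore, h10]
        _ = Nat.toDigitsCore 10 (f + 1) (n / 10) (Nat.digitChar (n % 10) :: acc) := ih _ _ hlt
        _ = Nat.toDigitsCore 10 (f + 2) n acc := by simp [Nat.toDigitsCore, h10]

-- Arbitrary surplus fuel is irrelevant.
theorem pv_tdc_fuel (k f : Nat) (n : Nat) (acc : List Char) (h : n < 10 ^ (f + 1)) :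
    Nat.toDigitsCore 10 (f + 1 + k) n acc = Nat.toDigitsCore 10 (f + 1) n acc := by
  induction k with
  | zero => rfl
  | succ k ih =>
    have h' : n < 10 ^ (f + k + 1) := lt_of_lt_of_le h (Nat.pow_le_pow_right (by norm_num) (by omega))
    have := pv_tdc_fuel_succ (f + k) n acc h'
    have e : f + 1 + (k + 1) = f + k + 2 := by omega
    rw [e, this]
    have e2 : f + k + 1 = f + 1 + k := by omega
    rw [e2, ih]

theorem pv_toDigits_small (n : Nat) (h : n < 10) : Nat.toDigits 10 n = [Nat.digitChar n] := by
  have h10 : n / 10 = 0 := Nat.div_eq_of_lt h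
  simp [Nat.toDigits, Nat.toDigitsCore, h10, Nat.mod_eq_of_lt h]

theorem pv_toDigits_rec (n : Nat) (h : 10 ≤ n) :
    Nat.toDigits 10 n = Nat.toDigits 10 (n / 10) ++ [Nat.digitChar (n % 10)] := by
  have h10 : n / 10 ≠ 0 := by
    intro h0; have := Nat.div_eq_of_lt (show n < 10 by omega); omega
  have hm : n / 10 < n := Nat.div_lt_self (by omega) (by norm_num)
  have hstep : Nat.toDigits 10 n
      = Nat.toDigitsCore 10 n (n / 10) [Nat.digitChar (n % 10)] := by
    simp [Nat.toDigits, Nat.toDigitsCore, h10]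
  rw [hstep, pv_tdc_append]
  congr 1
  -- fuel n versus fuel (n/10 + 1)
  have hlt : n / 10 < 10 ^ (n / 10 + 1) := by
    calc n / 10 < 2 ^ (n / 10) := Nat.lt_two_pow_self
      _ ≤ 10 ^ (n / 10) := Nat.pow_le_pow_left (by norm_num) _
      _ ≤ 10 ^ (n / 10 + 1) := Nat.pow_le_pow_right (by norm_num) (by omega)
  have hfe := pv_tdc_fuel (n - n / 10 - 1) (n / 10) (n / 10) [] hlt
  have e : n / 10 + 1 + (n - n / 10 - 1) = n := by omega
  rw [e] at hfe
  rw [hfe]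
  rfl

theorem pv_digitChar_inj (a b : Nat) (ha : a < 10) (hb : b < 10)
    (h : Nat.digitChar a = Nat.digitChar b) : a = b := by
  interval_cases a <;> interval_cases b <;> simp_all [Nat.digitChar]

theorem pv_digitChar_ne (a : Nat) (ha : a < 10) :
    Nat.digitChar a ≠ '+' ∧ Nat.digitChar a ≠ '-' ∧ (0 < a → Nat.digitChar a ≠ '0') := by
  interval_cases a <;> simp [Nat.digitChar]

theorem pv_toDigits_head (n : Nat) (h : 0 < n) :
    ∃ c t, Nat.toDigits 10 n = c :: t ∧ c ≠ '0' := by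
  induction n using Nat.strong_induction_on with
  | _ n ih =>
    by_cases hs : n < 10
    · exact ⟨Nat.digitChar n, [], pv_toDigits_small n hs, (pv_digitChar_ne n hs).2.2 h⟩
    · have hm : n / 10 < n := Nat.div_lt_self h (by norm_num)
      have hp : 0 < n / 10 := Nat.div_pos (by omega) (by norm_num)
      obtain ⟨c, t, hct, hc⟩ := ih (n / 10) hm hp
      exact ⟨c, t ++ [Nat.digitChar (n % 10)], by rw [pv_toDigits_rec n (by omega), hct]; rfl, hc⟩

theorem pv_toDigits_inj (n : Nat) : ∀ m, Nat.toDigits 10 n = Nat.toDigits 10 m → n = m := by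
  induction n using Nat.strong_induction_on with
  | _ n ih =>
    intro m h
    by_cases hn : n < 10 <;> by_cases hm : m < 10
    · rw [pv_toDigits_small n hn, pv_toDigits_small m hm] at h
      exact pv_digitChar_inj n m hn hm (by simpa using h)
    · exfalso
      rw [pv_toDigits_small n hn, pv_toDigits_rec m (by omega)] at h
      have hlen := congrArg List.length h
      obtain ⟨c, t, hct, _⟩ := pv_toDigits_head (m / 10) (Nat.div_pos (by omega) (by norm_num))
      rw [hct] at hlen
      simp at hlen
    · exfalso
      rw [pv_toDigits_small m hm, pv_toDigits_rec n (by omega)] at h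
      have hlen := congrArg List.length h
      obtain ⟨c, t, hct, _⟩ := pv_toDigits_head (n / 10) (Nat.div_pos (by omega) (by norm_num))
      rw [hct] at hlen
      simp at hlen
    · rw [pv_toDigits_rec n (by omega), pv_toDigits_rec m (by omega)] at h
      obtain ⟨h1, h2⟩ := List.append_inj' h (by simp)
      have e1 : n / 10 = m / 10 :=
        ih (n / 10) (Nat.div_lt_self (by omega) (by norm_num)) (m / 10) h1
      have e2 : n % 10 = m % 10 :=
        pv_digitChar_inj _ _ (Nat.mod_lt _ (by norm_num)) (Nat.mod_lt _ (by norm_num))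
          (by simpa using h2)
      omega

-- zfill of a decimal rendering to width 2
def pvZf (n : Nat) : List Char := PySem.Chars.zfill (Nat.toDigits 10 n) 2

theorem pv_zfill_two_of_le (cs : List Char) (h : 2 ≤ cs.length) :
    PySem.Chars.zfill cs 2 = cs := by
  rw [PySem.Chars.zfill.eq_def, if_pos (by exact_mod_cast h)]

theorem pv_zf_small (n : Nat) (h : n < 10) : pvZf n = ['0', Nat.digitChar n] := by
  obtain ⟨h1, h2, _⟩ := pv_digitChar_ne n h
  rw [pvZf, pv_toDigits_small n h, PySem.Chars.zfill.eq_def]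
  simp [h1, h2]

theorem pv_zf_large (n : Nat) (h : 10 ≤ n) : pvZf n = Nat.toDigits 10 n := by
  rw [pvZf, pv_toDigits_rec n h]
  obtain ⟨c, t, hct, _⟩ := pv_toDigits_head (n / 10) (Nat.div_pos h (by norm_num))
  apply pv_zfill_two_of_le
  rw [hct]
  simp

theorem pv_zf_inj (n m : Nat) (hn : 0 < n) (hm : 0 < m) (h : pvZf n = pvZf m) : n = m := by
  by_cases h1 : n < 10 <;> by_cases h2 : m < 10
  · rw [pv_zf_small n h1, pv_zf_small m h2] at h
    exact pv_digitChar_inj n m h1 h2 (by simpa using h)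
  · rw [pv_zf_small n h1, pv_zf_large m (by omega)] at h
    obtain ⟨c, t, hct, hc⟩ := pv_toDigits_head m hm
    rw [hct] at h
    simp at h
    exact absurd h.1.symm hc
  · rw [pv_zf_large n (by omega), pv_zf_small m h2] at h
    obtain ⟨c, t, hct, hc⟩ := pv_toDigits_head n hn
    rw [hct] at h
    simp at h
    exact absurd h.1 hc
  · rw [pv_zf_large n (by omega), pv_zf_large m (by omega)] at h
    exact pv_toDigits_inj n m h

theorem pv_toChars_nonneg (i : Int) (h : 0 ≤ i) :
    PySem.Int.toChars i = Nat.toDigits 10 i.toNat := by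
  simp [PySem.Int.toChars, not_lt.mpr h]

theorem pvWeekLabel_inj (i j : Int) (hi : 1 ≤ i) (hj : 1 ≤ j)
    (h : pvWeekLabel i = pvWeekLabel j) : i = j := by
  have h' := congrArg String.toList h
  unfold pvWeekLabel at h'
  by_cases c1 : i ≤ 52 <;> by_cases c2 : j ≤ 52 <;> simp [c1, c2] at h'
  · rw [pv_toChars_nonneg i (by omega), pv_toChars_nonneg j (by omega)] at h'
    have := pv_zf_inj i.toNat j.toNat (by omega) (by omega) h'
    omega
  · rw [pv_toChars_nonneg (i - 52) (by omega), pv_toChars_nonneg (j - 52) (by omega)] at h'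
    have := pv_zf_inj (i - 52).toNat (j - 52).toNat (by omega) (by omega) h'
    omega

theorem pvWeekLabel_ne_id (i : Int) : pvWeekLabel i ≠ "id" := by
  intro h
  have h' := congrArg String.toList h
  unfold pvWeekLabel at h'
  by_cases c1 : i ≤ 52 <;> simp [c1] at h'

-- the week labels attached by A's inner loop are exactly pvWeekLabel
theorem pv_inner_fun_eq :
    (fun (d : PySem.Dict String Int) (p : Int × Int) =>
      let week :=
        if p.1 ≤ 52 then
          String.ofList ('2' :: '0' :: '2' :: '2' :: '_' :: 'w' ::
            PySem.Chars.zfill (PySem.Int.toChars p.1) 2)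
        else
          String.ofList ('2' :: '0' :: '2' :: '3' :: '_' :: 'w' ::
            PySem.Chars.zfill (PySem.Int.toChars (p.1 - 52)) 2)
      d.insert week p.2)
    = fun d p => d.insert (pvWeekLabel p.1) p.2 := by
  funext d p
  unfold pvWeekLabel
  by_cases h : p.1 ≤ 52 <;> simp [h]

-- A's per-row dict, as an items list
theorem pv_row_items (vals : List Int) (x : Int) :
    ((PySem.List.enumerate vals 1).foldl (fun d p => d.insert (pvWeekLabel p.1) p.2)
        (PySem.Dict.empty.insert "id" x)).items
      = ("id", x) :: (PySem.List.enumerate vals 1).map (fun p => (pvWeekLabel p.1, p.2)) := by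
  have hitems0 : ((PySem.Dict.empty : PySem.Dict String Int).insert "id" x).items = [("id", x)] := by
    rw [PySem.Dict.items_insert_of_not_contains _ _ (PySem.Dict.contains_empty _)]
    rfl
  rw [PySem.Dict.items_foldl_insert_fresh (PySem.List.enumerate vals 1)
      (fun p => pvWeekLabel p.1) (fun p => p.2) _ ?fresh ?nodup, hitems0]
  · simp
  case fresh =>
    intro p hp
    rw [PySem.Dict.contains_insert]
    simp only [PySem.Dict.contains_empty, Bool.or_false]
    exact beq_eq_false_iff_ne.mpr (pvWeekLabel_ne_id p.1)
  case nodup =>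
    have hge : ∀ p ∈ PySem.List.enumerate vals 1, (1 : Int) ≤ p.1 := by
      intro p hp
      obtain ⟨k, hk, rfl⟩ := (PySem.List.mem_enumerate_iff vals 1 p).mp hp
      omega
    have hpw := PySem.List.pairwise_lt_enumerate vals 1
    rw [List.nodup_iff_pairwise_ne (l := List.map _ _)]
    rw [List.pairwise_map]
    refine (hpw.imp_of_mem ?_)
    intro p q hp hq hlt heq
    have := pvWeekLabel_inj p.1 q.1 (hge p hp) (hge q hq) heq
    omega

-- B's state after the first k columns: each row's dict holds id plus its first
-- min(k, len-1) values under their labels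
def pvDictOf (r : List Int) (m : Nat) : PySem.Dict String Int :=
  (PySem.List.enumerate ((r.drop 1).take m) 1).foldl
    (fun d p => d.insert (pvWeekLabel p.1) p.2)
    (PySem.Dict.empty.insert "id" (PySem.List.pyGetD r 0 0))

theorem pv_zip_map_self {α β : Type} (f : α → β) (l : List α) :
    (l.map f).zip l = l.map (fun a => (f a, a)) := by
  induction l with
  | nil => rfl
  | cons a t ih => simp [ih]

-- one column step extends each row's dict (or leaves it alone if the row is too short)
theorem pv_dictOf_succ (r : List Int) (m : Nat) :
    (if ((1 : Int) + m) < PySem.List.len r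
      then (pvDictOf r m).insert (pvWeekLabel (1 + m)) (PySem.List.pyGetD r (1 + m) 0)
      else pvDictOf r m)
    = pvDictOf r (m + 1) := by
  rw [PySem.List.len_eq]
  by_cases h : m + 1 < r.length
  · rw [if_pos (by omega)]
    have hm : m < (r.drop 1).length := by simp; omega
    unfold pvDictOf
    rw [List.take_add_one, (show (r.drop 1)[m]? = some (r.drop 1)[m] from List.getElem?_eq_getElem hm)]
    rw [PySem.List.enumerate_append, List.foldl_append]
    have hlen : ((r.drop 1).take m).length = m := by simp; omega
    simp only [hlen, Option.toList_some, PySem.List.enumerate_cons, PySem.List.enumerate_nil,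
      List.foldl_cons, List.foldl_nil]
    congr 1
    · rw [List.getElem_drop]
      rw [show ((1 : Int) + m) = ((1 + m : Nat) : Int) by push_cast; ring,
        PySem.List.pyGetD_natCast]
      exact List.getD_eq_getElem r 0 (by omega)
  · rw [if_neg (by omega)]
    unfold pvDictOf
    rw [List.take_of_length_le (by simp; omega), List.take_of_length_le (by simp; omega)]

-- the column loop, run over the first m columns
theorem pv_col_fold (rows : List (List Int)) : ∀ (m : Nat),
    (PySem.List.pyRange 1 (1 + (m : Int))).foldl
      (fun ds i =>
        (ds.zip rows).map (fun p =>
          if i < PySem.List.len p.2 then p.1.insert (pvWeekLabel i) (PySem.List.pyGetD p.2 i 0)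
          else p.1))
      (rows.map (fun r => pvDictOf r 0))
    = rows.map (fun r => pvDictOf r m) := by
  intro m
  induction m with
  | zero => rw [show ((1 : Int) + (0 : Nat)) = 1 by norm_num, PySem.List.pyRange_one_eq_nil le_rfl,
      List.foldl_nil]
  | succ m ih =>
    rw [show ((1 : Int) + ((m + 1 : Nat) : Int)) = (1 + (m : Int)) + 1 by push_cast; ring,
      PySem.List.pyRange_one_succ_right (by omega), List.foldl_append, ih, List.foldl_cons,
      List.foldl_nil, pv_zip_map_self, List.map_map]
    apply List.map_congr_left
    intro r _
    exact pv_dictOf_succ r m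

-- ===== VERDICT (by name: the statement is the Claim_ definition above) =====
theorem transform_weekly_sales_spec : Claim_equal_transform_weekly_sales := by
  intro rows _ hpre
  unfold Spec_transform_weekly_sales transform_weekly_sales transform_weekly_sales_alt
  simp only [pv_inner_fun_eq]
  rw [PySem.List.foldl_append_singleton_eq_map]
  simp only [List.nil_append]
  cases rows with
  | nil => rfl
  | cons r0 rest =>
    set rows := r0 :: rest with hrows
    set W : Int := PySem.List.maxD (rows.map PySem.List.len) (fun x => x) 1 with hW
    have hWle : ∀ r ∈ rows, PySem.List.len r ≤ W :=
      fun r hr => PySem.List.le_maxD_id _ 1 _ (List.mem_map_of_mem hr)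
    have h1W : 1 ≤ W := by
      have h0 := hWle r0 (by simp [hrows])
      have : r0 ≠ [] := hpre r0 (by simp [hrows])
      have : 1 ≤ r0.length := by cases r0 with | nil => simp_all | cons a l => simp
      rw [PySem.List.len_eq] at h0
      omega
    have hWm : W = 1 + ((W - 1).toNat : Int) := by omega
    have h0 : rows.map (fun r => (PySem.Dict.empty : PySem.Dict String Int).insert "id" (PySem.List.pyGetD r 0 0))
        = rows.map (fun r => pvDictOf r 0) := rfl
    rw [hWm, h0, pv_col_fold rows (W - 1).toNat, List.map_map]
    apply List.map_congr_left
    intro r hr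
    have hrW := hWle r hr
    rw [PySem.List.len_eq] at hrW
    have htake : ((r.drop 1).take (W - 1).toNat) = r.drop 1 :=
      List.take_of_length_le (by simp; omega)
    simp only [Function.comp, pvDictOf, htake]
    rw [PySem.List.slice_from r (by norm_num)]
    simp [pv_row_items]
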